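-- pv_equiv track=rewrite | github.com/ELITR/SLTev | SLTev/multi_docs_utils.py | get_candidate_docs
-- ===== SOURCE A (Python) =====
-- def get_candidate_docs(candidate_lines, split_token):
--     candidate_docs = []
--     docs_sentence = []
--     for line in  candidate_lines:
--         if ''.join(line[0][3:]).startswith(split_token):
--             candidate_docs.append(docs_sentence)
--             docs_sentence = []
--         else:
--             docs_sentence.append(line)
--     if docs_sentence:
--         candidate_docs.append(docs_sentence)
--         docs_sentence = []
--     return candidate_docs
-- ===== SOURCE B (Python) =====
-- def get_candidate_docs(candidate_lines, split_token):
--     def is_sep(line):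
--         return ''.join(line[0][3:]).startswith(split_token)
--
--     def go(lines):
--         for i, line in enumerate(lines):
--             if is_sep(line):
--                 return [lines[:i]] + go(lines[i + 1:])
--         return [lines] if lines else []
--
--     return go(candidate_lines)
-- ===== Notes on version B (the rewrite author's own statement) =====
-- stated objective: alternative
-- what changed: Replaced A's single accumulator loop (append-to-current-group, flush on separator) by a recursive decomposition that finds the first separator index and builds each group as a slice of the input, recursing on the remainder.
import Mathlib
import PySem

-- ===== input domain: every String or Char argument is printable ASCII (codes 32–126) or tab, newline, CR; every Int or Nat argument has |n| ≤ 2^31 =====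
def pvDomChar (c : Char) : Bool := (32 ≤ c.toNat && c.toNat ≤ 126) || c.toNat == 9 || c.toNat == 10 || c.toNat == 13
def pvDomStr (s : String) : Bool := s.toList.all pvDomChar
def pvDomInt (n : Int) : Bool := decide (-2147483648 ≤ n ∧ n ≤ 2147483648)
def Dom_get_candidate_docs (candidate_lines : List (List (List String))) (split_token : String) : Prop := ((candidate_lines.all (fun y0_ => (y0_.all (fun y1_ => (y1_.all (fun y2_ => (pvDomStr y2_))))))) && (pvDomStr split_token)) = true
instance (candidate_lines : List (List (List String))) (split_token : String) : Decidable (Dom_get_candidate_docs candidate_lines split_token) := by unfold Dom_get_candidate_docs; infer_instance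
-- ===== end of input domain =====

-- B replaces A's accumulator loop by a recursive split at the first separator line,
-- building each group as a slice (objective: alternative decomposition, same cost).
-- Both A and B raise IndexError on a line that is the empty list; Pre_ excludes those.

-- ===== PORT A =====
-- shared separator test: ''.join(line[0][3:]).startswith(split_token)
-- (both Pythons evaluate this identical expression; line[0] is total under Pre_)
def pvIsSep (line : List (List String)) (split_token : String) : Bool :=
  PySem.Str.startswith
    (PySem.Str.join "" (PySem.List.slice ((PySem.List.pyGet? line 0).getD []) (some 3) none))
    split_token

def get_candidate_docs (candidate_lines : List (List (List String))) (split_token : String) : List (List (List (List String))) :=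
  let st := candidate_lines.foldl
    (fun (st : List (List (List (List String))) × List (List (List String))) line =>
      if pvIsSep line split_token then (st.1 ++ [st.2], [])
      else (st.1, st.2 ++ [line]))
    ([], [])
  if st.2 = [] then st.1 else st.1 ++ [st.2]

-- ===== PORT B =====
-- termination fact for pvGoB's recursion (cited by its decreasing_by)
theorem pv_findIdx?_lt_length {α : Type} (p : α → Bool) (l : List α) (i : Nat)
    (h : l.findIdx? p = some i) : i < l.length := by
  induction l generalizing i with
  | nil => simp at h
  | cons x xs ih =>
    rw [List.findIdx?_cons] at h
    split at h
    · injection h with h; subst h; simp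
    · cases hfi : xs.findIdx? p with
      | none => rw [hfi] at h; cases h
      | some j =>
        rw [hfi] at h; injection h with h; subst h
        have := ih j hfi; simp; omega

-- go: find the first separator index; emit the slice before it and recurse past it.
def pvGoB (split_token : String) (lines : List (List (List String))) : List (List (List (List String))) :=
  match h : lines.findIdx? (fun line => pvIsSep line split_token) with
  | some i => lines.take i :: pvGoB split_token (lines.drop (i + 1))
  | none => if lines = [] then [] else [lines]
termination_by lines.length
decreasing_by
  have hlt : i < lines.length := pv_findIdx?_lt_length _ _ _ h
  simp only [List.length_drop]; omega

def get_candidate_docs_alt (candidate_lines : List (List (List String))) (split_token : String) : List (List (List (List String))) :=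
  pvGoB split_token candidate_lines

-- ===== PRECONDITION & SPEC =====
-- Pre_ excludes inputs containing an empty line: there line[0] raises IndexError in A (and in B).
def Pre_get_candidate_docs (candidate_lines : List (List (List String))) (split_token : String) : Prop :=
  ∀ line ∈ candidate_lines, line ≠ []
instance (candidate_lines : List (List (List String))) (split_token : String) : Decidable (Pre_get_candidate_docs candidate_lines split_token) := by unfold Pre_get_candidate_docs; infer_instance

def pvWitness_get_candidate_docs : List (List (List String)) × String :=
  ([[["P1 ", "Doc1 a"]], [["P1 ", "###docSpliter###"]], [["P1 ", "Doc2 b"]]], "###docSpliter###")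

def Spec_get_candidate_docs (candidate_lines : List (List (List String))) (split_token : String) (out : List (List (List (List String)))) : Prop := out = get_candidate_docs_alt candidate_lines split_token
instance (candidate_lines : List (List (List String))) (split_token : String) (out : List (List (List (List String)))) : Decidable (Spec_get_candidate_docs candidate_lines split_token out) := by unfold Spec_get_candidate_docs; infer_instance

-- ===== CLAIM (what is proved, stated in full; the proofs are below) =====
def Claim_equal_get_candidate_docs : Prop := ∀ (candidate_lines : List (List (List String))) (split_token : String), Dom_get_candidate_docs candidate_lines split_token → Pre_get_candidate_docs candidate_lines split_token → Spec_get_candidate_docs candidate_lines split_token (get_candidate_docs candidate_lines split_token)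

-- ===== LEMMAS AND PROOFS =====

-- A's result, described by a structural recursion on the input with the current group as state.
def pvRun (tok : String) (cur : List (List (List String))) : List (List (List String)) → List (List (List (List String)))
  | [] => if cur = [] then [] else [cur]
  | x :: xs => if pvIsSep x tok then cur :: pvRun tok [] xs else pvRun tok (cur ++ [x]) xs

-- finishing A's fold state
def pvFin (st : List (List (List (List String))) × List (List (List String))) : List (List (List (List String))) :=
  if st.2 = [] then st.1 else st.1 ++ [st.2]

lemma pvFold_eq_run (tok : String) (l : List (List (List String)))
    (acc : List (List (List (List String)))) (cur : List (List (List String))) :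
    pvFin (l.foldl
      (fun st line => if pvIsSep line tok then (st.1 ++ [st.2], []) else (st.1, st.2 ++ [line]))
      (acc, cur)) = acc ++ pvRun tok cur l := by
  induction l generalizing acc cur with
  | nil => simp [pvFin, pvRun]; split <;> simp_all
  | cons x xs ih =>
    simp only [List.foldl_cons, pvRun]
    by_cases h : pvIsSep x tok = true
    · simp [h, ih]
    · simp [h, ih]

-- prepend cur to the first group of a result
def pvH (cur : List (List (List String))) : List (List (List (List String))) → List (List (List (List String)))
  | [] => if cur = [] then [] else [cur]
  | g :: gs => (cur ++ g) :: gs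

-- B's recursion satisfies the head-step recurrence
lemma pvGoB_some (tok : String) (l : List (List (List String))) (i : Nat)
    (hi : l.findIdx? (fun line => pvIsSep line tok) = some i) :
    pvGoB tok l = l.take i :: pvGoB tok (l.drop (i + 1)) := by
  rw [pvGoB]
  split
  · rename_i j hj; rw [hi] at hj; injection hj with hj; subst hj; rfl
  · rename_i hj; rw [hi] at hj; cases hj

lemma pvGoB_none (tok : String) (l : List (List (List String)))
    (hi : l.findIdx? (fun line => pvIsSep line tok) = none) :
    pvGoB tok l = if l = [] then [] else [l] := by
  rw [pvGoB]
  split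
  · rename_i j hj; rw [hi] at hj; cases hj
  · rfl

lemma pvGoB_nil (tok : String) : pvGoB tok [] = [] := by
  rw [pvGoB_none tok [] (by simp)]; simp

lemma pvGoB_cons (tok : String) (x : List (List String)) (xs : List (List (List String))) :
    pvGoB tok (x :: xs) =
      if pvIsSep x tok then [] :: pvGoB tok xs
      else match pvGoB tok xs with
        | [] => [[x]]
        | g :: gs => (x :: g) :: gs := by
  by_cases h : pvIsSep x tok = true
  · have h0 : (x :: xs).findIdx? (fun line => pvIsSep line tok) = some 0 := by
      simp [List.findIdx?_cons, h]
    rw [pvGoB_some tok (x :: xs) 0 h0]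
    simp [h]
  · have hstep : (x :: xs).findIdx? (fun line => pvIsSep line tok)
        = (xs.findIdx? (fun line => pvIsSep line tok)).map (· + 1) := by
      simp [List.findIdx?_cons, h]
    cases hfi : xs.findIdx? (fun line => pvIsSep line tok) with
    | some i =>
      have h1 : (x :: xs).findIdx? (fun line => pvIsSep line tok) = some (i + 1) := by
        rw [hstep, hfi]; rfl
      rw [pvGoB_some tok (x :: xs) (i + 1) h1, pvGoB_some tok xs i hfi]
      simp [h]
    | none =>
      have h1 : (x :: xs).findIdx? (fun line => pvIsSep line tok) = none := by
        rw [hstep, hfi]; rfl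
      rw [pvGoB_none tok (x :: xs) h1, pvGoB_none tok xs hfi]
      by_cases hxs : xs = []
      · subst hxs; simp [h]
      · simp [h, hxs]

lemma pvRun_eq_goB (tok : String) (l : List (List (List String))) (cur : List (List (List String))) :
    pvRun tok cur l = pvH cur (pvGoB tok l) := by
  induction l generalizing cur with
  | nil => simp [pvRun, pvGoB_nil, pvH]
  | cons x xs ih =>
    rw [pvRun, pvGoB_cons]
    by_cases h : pvIsSep x tok = true
    · simp only [h, if_true]
      rw [ih]
      cases hg : pvGoB tok xs with
      | nil => simp [pvH]
      | cons g gs => simp [pvH]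
    · simp only [h, if_false, Bool.false_eq_true]
      rw [ih]
      cases hg : pvGoB tok xs with
      | nil => simp [pvH]
      | cons g gs => simp [pvH]

-- ===== VERDICT (by name: the statement is the Claim_ definition above) =====
theorem get_candidate_docs_spec : Claim_equal_get_candidate_docs := by
  intro cl tok _ _
  unfold Spec_get_candidate_docs get_candidate_docs get_candidate_docs_alt
  have h1 := pvFold_eq_run tok cl [] []
  have h2 := pvRun_eq_goB tok cl []
  simp only [pvFin] at h1
  simp only [h1, h2, List.nil_append]
  cases pvGoB tok cl <;> simp [pvH]
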